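-- pv_equiv track=rewrite | github.com/ErnoMitrovic/chessPython | utilities.py | find_piece
-- ===== SOURCE A (Python) =====
-- def find_piece(piece, piece_array):
--   i = 0
--   cordinates = []
--   for row in piece_array:
--     if piece in row:
--       cordinates = [i, row.index(piece)]
--     i += 1
--   return cordinates
-- ===== SOURCE B (Python) =====
-- def find_piece(piece, piece_array):
--   for i in range(len(piece_array) - 1, -1, -1):
--     row = piece_array[i]
--     if piece in row:
--       return [i, row.index(piece)]
--   return []
-- ===== Notes on version B (the rewrite author's own statement) =====
-- stated objective: alternative
-- what changed: A scans every row and keeps overwriting an accumulator with the latest hit; B scans the rows from last to first and returns immediately at the first row containing the piece.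
import Mathlib
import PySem

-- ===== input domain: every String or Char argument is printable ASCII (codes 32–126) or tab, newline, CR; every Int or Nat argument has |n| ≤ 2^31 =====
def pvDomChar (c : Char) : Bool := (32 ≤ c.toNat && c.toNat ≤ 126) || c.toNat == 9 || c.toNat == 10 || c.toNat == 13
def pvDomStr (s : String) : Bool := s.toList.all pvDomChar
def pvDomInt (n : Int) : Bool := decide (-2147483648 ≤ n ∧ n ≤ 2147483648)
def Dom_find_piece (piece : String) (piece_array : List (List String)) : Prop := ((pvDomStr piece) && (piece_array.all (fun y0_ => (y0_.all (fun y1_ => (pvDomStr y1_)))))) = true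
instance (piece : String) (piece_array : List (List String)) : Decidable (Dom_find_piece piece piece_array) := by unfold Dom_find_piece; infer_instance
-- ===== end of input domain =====

-- B replaces A's forward scan with accumulator overwrite by a reverse scan with early return; same return value everywhere.
-- ===== PORT A =====
def find_piece (piece : String) (piece_array : List (List String)) : List Int :=
  (piece_array.foldl
    (fun (st : Int × List Int) row =>
      (st.1 + 1,
        if row.contains piece then
          [st.1, ((PySem.List.index? row piece).getD 0 : Nat)]
        else st.2))
    (0, [])).2

-- ===== PORT B =====
-- reverse scan with early return (helper walks the reversed list, counting the index down)
def fpAltGo (piece : String) : List (List String) → Nat → List Int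
  | [], _ => []
  | row :: rest, i =>
      if row.contains piece then
        [(i : Int), ((PySem.List.index? row piece).getD 0 : Nat)]
      else fpAltGo piece rest (i - 1)

def find_piece_alt (piece : String) (piece_array : List (List String)) : List Int :=
  fpAltGo piece piece_array.reverse (piece_array.length - 1)

-- ===== PRECONDITION & SPEC =====
def Spec_find_piece (piece : String) (piece_array : List (List String)) (out : List Int) : Prop := out = find_piece_alt piece piece_array
instance (piece : String) (piece_array : List (List String)) (out : List Int) : Decidable (Spec_find_piece piece piece_array out) := by unfold Spec_find_piece; infer_instance

-- ===== CLAIM (what is proved, stated in full; the proofs are below) =====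
def Claim_equal_find_piece : Prop := ∀ (piece : String) (piece_array : List (List String)), Dom_find_piece piece piece_array → Spec_find_piece piece piece_array (find_piece piece piece_array)

-- ===== LEMMAS AND PROOFS =====
def fpStep (piece : String) (st : Int × List Int) (row : List String) : Int × List Int :=
  (st.1 + 1,
    if row.contains piece then
      [st.1, ((PySem.List.index? row piece).getD 0 : Nat)]
    else st.2)

theorem fpStep_fst (piece : String) (xs : List (List String)) (n : Int) (c : List Int) :
    (xs.foldl (fpStep piece) (n, c)).1 = n + xs.length := by
  induction xs generalizing n c with
  | nil => simp
  | cons row rest ih =>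
      simp only [List.foldl_cons, List.length_cons]
      rw [ih]
      unfold fpStep
      push_cast
      ring

theorem fp_eq (piece : String) (arr : List (List String)) :
    find_piece piece arr = find_piece_alt piece arr := by
  induction arr using List.reverseRecOn with
  | nil => rfl
  | append_singleton xs row ih =>
      have hfold : find_piece piece (xs ++ [row])
          = (fpStep piece (xs.foldl (fpStep piece) (0, [])) row).2 := by
        show ((xs ++ [row]).foldl (fpStep piece) (0, [])).2 = _
        rw [List.foldl_append]
        rfl
      have hA : find_piece piece xs = (xs.foldl (fpStep piece) (0, [])).2 := rfl
      have hfst := fpStep_fst piece xs 0 []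
      have hsnd : (fpStep piece (xs.foldl (fpStep piece) (0, [])) row).2
          = if row.contains piece then
              [(xs.foldl (fpStep piece) (0, [])).1,
                ((PySem.List.index? row piece).getD 0 : Nat)]
            else (xs.foldl (fpStep piece) (0, [])).2 := rfl
      have hrev : (xs ++ [row]).reverse = row :: xs.reverse := by simp
      have hlen : (xs ++ [row]).length - 1 = xs.length := by simp
      have hB : find_piece_alt piece (xs ++ [row])
          = if row.contains piece then
              [(xs.length : Int), ((PySem.List.index? row piece).getD 0 : Nat)]
            else fpAltGo piece xs.reverse (xs.length - 1) := by
        unfold find_piece_alt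
        rw [hrev, hlen]
        rfl
      rw [hfold, hsnd, hB]
      by_cases h : row.contains piece
      · rw [if_pos h, if_pos h, hfst]
        norm_num
      · rw [if_neg h, if_neg h, ← hA, ih]
        rfl

-- ===== VERDICT (by name: the statement is the Claim_ definition above) =====
theorem find_piece_spec : Claim_equal_find_piece := by
  intro piece arr _
  unfold Spec_find_piece
  exact fp_eq piece arr
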